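-- pv_equiv track=rewrite | github.com/LarkLucifer/GhillieSuite-EX | ghilliesuite_ex/utils/reporter.py | _extract_evidence_paths
-- ===== SOURCE A (Python) =====
-- def _extract_evidence_paths(text: str) -> tuple[str, str]:
--     """Extract evidence request/response file paths from a finding's evidence."""
--     req_path = ""
--     res_path = ""
--     for line in (text or "").splitlines():
--         if "Request:" in line:
--             req_path = line.split("Request:", 1)[-1].strip()
--         if "Response:" in line:
--             res_path = line.split("Response:", 1)[-1].strip()
--     return req_path, res_path
-- ===== SOURCE B (Python) =====
-- def _find_last(lines, marker):
--     """Payload of the last line containing marker = first hit scanning backward."""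
--     for line in reversed(lines):
--         if marker in line:
--             return line.split(marker, 1)[-1].strip()
--     return ""
--
--
-- def _extract_evidence_paths(text: str) -> tuple[str, str]:
--     """Extract evidence request/response file paths from a finding's evidence."""
--     lines = (text or "").splitlines()
--     return _find_last(lines, "Request:"), _find_last(lines, "Response:")
-- ===== Notes on version B (the rewrite author's own statement) =====
-- stated objective: simpler
-- what changed: B replaces A's forward pass that keeps overwriting two fields by one generic helper that scans the lines backward and returns the first hit per marker (the last forward occurrence), called once for each marker.
import Mathlib
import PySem

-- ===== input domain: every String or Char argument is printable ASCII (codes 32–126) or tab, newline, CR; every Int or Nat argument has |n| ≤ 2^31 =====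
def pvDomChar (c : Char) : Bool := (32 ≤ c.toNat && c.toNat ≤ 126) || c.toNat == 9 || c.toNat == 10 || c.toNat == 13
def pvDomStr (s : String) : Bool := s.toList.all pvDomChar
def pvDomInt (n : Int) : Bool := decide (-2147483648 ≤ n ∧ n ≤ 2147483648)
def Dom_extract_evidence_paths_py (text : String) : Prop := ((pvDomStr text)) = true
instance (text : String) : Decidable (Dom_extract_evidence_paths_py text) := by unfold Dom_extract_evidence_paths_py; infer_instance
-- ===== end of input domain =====

-- B replaces A's forward overwrite pass by a generic backward search per marker (simpler decomposition).

-- line.split(sep, 1)[-1].strip()  (sep is a nonempty literal, so splitMax? is some and the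
-- resulting list is nonempty, so [-1] never raises; the getD defaults are unreachable)
def pvPayload (sep line : String) : String :=
  PySem.Str.strip ((PySem.List.pyGet? ((PySem.Str.splitMax? line sep 1).getD []) (-1)).getD "")

-- ===== PORT A =====
def extract_evidence_paths_py (text : String) : String × String :=
  (PySem.Str.splitlines text).foldl
    (fun st line =>
      let st1 := if PySem.Str.isIn "Request:" line then (pvPayload "Request:" line, st.2) else st
      if PySem.Str.isIn "Response:" line then (st1.1, pvPayload "Response:" line) else st1)
    ("", "")

-- ===== PORT B =====
-- _find_last(lines, marker), the 'for line in reversed(lines)' loop as recursion over lines.reverse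
def pvFindLast (marker : String) : List String → String
  | [] => ""
  | line :: rest =>
      if PySem.Str.isIn marker line then pvPayload marker line else pvFindLast marker rest

def extract_evidence_paths_py_alt (text : String) : String × String :=
  let lines := (PySem.Str.splitlines text).reverse
  (pvFindLast "Request:" lines, pvFindLast "Response:" lines)

-- ===== PRECONDITION & SPEC =====
def Spec_extract_evidence_paths_py (text : String) (out : String × String) : Prop := out = extract_evidence_paths_py_alt text
instance (text : String) (out : String × String) : Decidable (Spec_extract_evidence_paths_py text out) := by unfold Spec_extract_evidence_paths_py; infer_instance

-- ===== CLAIM (what is proved, stated in full; the proofs are below) =====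
def Claim_equal_extract_evidence_paths_py : Prop := ∀ (text : String), Dom_extract_evidence_paths_py text → Spec_extract_evidence_paths_py text (extract_evidence_paths_py text)

-- ===== LEMMAS AND PROOFS =====

-- A's last-overwrite fold over L computes the first backward hit, i.e. pvFindLast on L.reverse.
theorem pvFoldA_eq (L : List String) :
    L.foldl
      (fun st line =>
        let st1 := if PySem.Str.isIn "Request:" line then (pvPayload "Request:" line, st.2) else st
        if PySem.Str.isIn "Response:" line then (st1.1, pvPayload "Response:" line) else st1)
      ("", "") =
    (pvFindLast "Request:" L.reverse, pvFindLast "Response:" L.reverse) := by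
  induction L using List.reverseRecOn with
  | nil => rfl
  | append_singleton L x ih =>
      rw [List.foldl_append, ih]
      simp only [List.foldl_cons, List.foldl_nil, List.reverse_append, List.reverse_cons,
        List.reverse_nil, List.nil_append, List.cons_append, pvFindLast]
      by_cases h1 : PySem.Str.isIn "Request:" x <;>
        by_cases h2 : PySem.Str.isIn "Response:" x <;> simp at h1 h2 <;> simp [h1, h2]

-- ===== VERDICT (by name: the statement is the Claim_ definition above) =====
theorem extract_evidence_paths_py_spec : Claim_equal_extract_evidence_paths_py := by
  intro text _
  show _ = _
  rw [extract_evidence_paths_py, extract_evidence_paths_py_alt, pvFoldA_eq]
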